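-- pv_equiv track=rewrite | github.com/golarajahangir/learn-python | course_exercise/seperator.py | seperator
-- ===== SOURCE A (Python) =====
-- def seperator(number):
--     list1 = list(number[::-1])
--     list2 = []
--     for index, value in enumerate(list1):
--         x = index + 1
--         list2.append(value)
--         if x % 3 == 0 and x != len(list1):
--             list2.append(",")
--
--     result = "".join(list2[::-1])
--     return result
-- ===== SOURCE B (Python) =====
-- def seperator(number):
--     parts = []
--     i = len(number)
--     while i > 0:
--         parts.append(number[max(0, i - 3):i])
--         i -= 3
--     return ",".join(reversed(parts))
-- ===== Notes on version B (the rewrite author's own statement) =====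
-- stated objective: simpler
-- what changed: Replaces A's reverse-the-string, per-character counter with modulo test and second reversal by slicing the string into 3-character chunks from the right and joining the chunks with commas.
import Mathlib
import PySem

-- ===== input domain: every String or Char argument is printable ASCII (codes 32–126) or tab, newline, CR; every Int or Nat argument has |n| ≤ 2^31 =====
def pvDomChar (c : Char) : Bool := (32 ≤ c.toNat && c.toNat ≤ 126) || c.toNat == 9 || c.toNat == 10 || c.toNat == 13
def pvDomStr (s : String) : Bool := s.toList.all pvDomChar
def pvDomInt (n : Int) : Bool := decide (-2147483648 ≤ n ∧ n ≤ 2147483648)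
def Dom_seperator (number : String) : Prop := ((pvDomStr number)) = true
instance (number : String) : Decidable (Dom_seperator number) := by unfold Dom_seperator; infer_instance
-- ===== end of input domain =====

-- B replaces A's reverse-and-count-per-character loop by slicing the string into
-- 3-character chunks from the right, joined with commas (objective: simpler).

-- ===== PORT A =====
def seperator (number : String) : String :=
  let list1 : List Char := number.toList.reverse  -- list(number[::-1]); exact by PySem.List.slice?_none_none_neg_one
  let list2 : List Char :=
    (PySem.List.enumerate list1).foldl
      (fun list2 iv =>
        let x : Int := iv.1 + 1
        let list2 := list2 ++ [iv.2]
        if x % 3 == 0 && x != (list1.length : Int) then list2 ++ [','] else list2)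
      []
  -- "".join(list2[::-1]) of single-character strings; exact by PySem.Chars.join_nil_singletons
  String.ofList list2.reverse

-- ===== PORT B =====
-- while i > 0: parts.append(number[max(0, i - 3):i]); i -= 3
def seperator_altLoop (s : List Char) (i : Nat) (parts : List (List Char)) :
    List (List Char) :=
  if i > 0 then
    seperator_altLoop s (i - 3)
      (parts ++ [PySem.List.slice s (some (max 0 ((i : Int) - 3))) (some (i : Int))])
  else parts
termination_by i
decreasing_by omega

def seperator_alt (number : String) : String :=
  let s : List Char := number.toList
  let parts := seperator_altLoop s s.length []
  -- ",".join(reversed(parts)); exact by PySem.Chars.toList_join bridge (strings ↔ code points)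
  String.ofList (PySem.Chars.join [','] parts.reverse)

-- ===== PRECONDITION & SPEC =====
def Spec_seperator (number : String) (out : String) : Prop := out = seperator_alt number
instance (number : String) (out : String) : Decidable (Spec_seperator number out) := by unfold Spec_seperator; infer_instance

-- ===== CLAIM (what is proved, stated in full; the proofs are below) =====
def Claim_equal_seperator : Prop := ∀ (number : String), Dom_seperator number → Spec_seperator number (seperator number)

-- ===== LEMMAS AND PROOFS =====

-- The element list A appends for one enumerated character (value, then maybe a comma).
def gA (n : Int) (iv : Int × Char) : List Char :=
  iv.2 :: (if (iv.1 + 1) % 3 = 0 ∧ (iv.1 + 1) ≠ n then [','] else [])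

-- Reference shape: A's list2 on the reversed character list.
def grp : List Char → List Char
  | [] => []
  | [a] => [a]
  | [a, b] => [a, b]
  | [a, b, c] => [a, b, c]
  | a :: b :: c :: d :: rest => a :: b :: c :: ',' :: grp (d :: rest)

theorem grp_short (l : List Char) (h : l.length ≤ 3) : grp l = l := by
  match l with
  | [] => rfl
  | [_] => rfl
  | [_, _] => rfl
  | [_, _, _] => rfl
  | _ :: _ :: _ :: _ :: _ => simp at h; omega

theorem grp_long (l : List Char) (h : 4 ≤ l.length) :
    grp l = l.take 3 ++ ',' :: grp (l.drop 3) := by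
  match l with
  | [] | [_] | [_, _] | [_, _, _] => simp at h
  | _ :: _ :: _ :: _ :: _ => simp [grp]

theorem foldA_eq_flatMap (l : List (Int × Char)) (n : Int) (acc : List Char) :
    l.foldl
      (fun list2 iv =>
        let x : Int := iv.1 + 1
        let list2' := list2 ++ [iv.2]
        if x % 3 == 0 && x != n then list2' ++ [','] else list2') acc
      = acc ++ l.flatMap (gA n) := by
  have h : (fun (list2 : List Char) (iv : Int × Char) =>
        let x : Int := iv.1 + 1
        let list2' := list2 ++ [iv.2]
        if x % 3 == 0 && x != n then list2' ++ [','] else list2')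
      = fun list2 iv => list2 ++ gA n iv := by
    funext a iv
    by_cases hc : (iv.1 + 1) % 3 = 0 ∧ (iv.1 + 1) ≠ n
    · simp [gA, hc]
    · rcases not_and_or.mp hc with h1 | h2
      · simp [gA, h1]
      · have h2' : iv.1 + 1 = n := not_not.mp h2
        simp [gA, h2']
  rw [h, PySem.List.foldl_append_eq_flatMap]

theorem A_eq_grp (r : List Char) :
    ∀ (s : Nat), s % 3 = 0 →
      (PySem.List.enumerate r (s : Int)).flatMap (gA ((s : Int) + r.length)) = grp r := by
  induction r using grp.induct with
  | case1 =>
    intro s hs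
    simp [PySem.List.enumerate_nil, grp]
  | case2 a =>
    intro s hs
    simp only [PySem.List.enumerate_cons, PySem.List.enumerate_nil, List.flatMap_cons,
      List.flatMap_nil, gA, grp, List.length_cons, List.length_nil]
    split_ifs <;> first | (exfalso; omega) | simp
  | case3 a b =>
    intro s hs
    simp only [PySem.List.enumerate_cons, PySem.List.enumerate_nil, List.flatMap_cons,
      List.flatMap_nil, gA, grp, List.length_cons, List.length_nil]
    split_ifs <;> first | (exfalso; omega) | simp
  | case4 a b c =>
    intro s hs
    simp only [PySem.List.enumerate_cons, PySem.List.enumerate_nil, List.flatMap_cons,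
      List.flatMap_nil, gA, grp, List.length_cons, List.length_nil]
    split_ifs <;> first | (exfalso; omega) | simp
  | case5 a b c d rest ih =>
    intro s hs
    have en : ((s : Int) + ((a :: b :: c :: d :: rest : List Char).length : Int))
        = (((s + 3 : Nat)) : Int) + (((d :: rest : List Char).length : Int)) := by
      simp only [List.length_cons]; push_cast; ring
    rw [en, PySem.List.enumerate_cons, PySem.List.enumerate_cons, PySem.List.enumerate_cons,
      List.flatMap_cons, List.flatMap_cons, List.flatMap_cons]
    have e3 : ((s : Int) + 1 + 1 + 1) = (((s + 3 : Nat)) : Int) := by push_cast; ring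
    rw [e3, ih (s + 3) (by omega)]
    simp only [gA, List.length_cons]
    split_ifs <;> first | (exfalso; omega) | simp [grp]

theorem loop_acc (s : List Char) :
    ∀ (i : Nat) (parts : List (List Char)),
      seperator_altLoop s i parts = parts ++ seperator_altLoop s i [] := by
  intro i
  induction i using Nat.strong_induction_on with
  | _ i ih =>
    intro parts
    conv_lhs => rw [seperator_altLoop]
    conv_rhs => rw [seperator_altLoop]
    by_cases h : i > 0
    · simp only [if_pos h]
      rw [ih (i - 3) (by omega), ih (i - 3) (by omega) ([] ++ _)]
      simp
    · simp [if_neg h]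

theorem join_append_single (sep x : List Char) (xs : List (List Char)) (h : xs ≠ []) :
    PySem.Chars.join sep (xs ++ [x]) = PySem.Chars.join sep xs ++ sep ++ x := by
  induction xs with
  | nil => exact absurd rfl h
  | cons y ys ih =>
    cases ys with
    | nil => simp [PySem.Chars.join_cons_cons, PySem.Chars.join_singleton]
    | cons z zs =>
      have e1 : (y :: z :: zs) ++ [x] = y :: z :: (zs ++ [x]) := by simp
      rw [e1, PySem.Chars.join_cons_cons]
      have e2 : z :: (zs ++ [x]) = (z :: zs) ++ [x] := by simp
      rw [e2, ih (by simp), PySem.Chars.join_cons_cons]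
      simp

theorem B_eq (s : List Char) :
    ∀ (i : Nat), i ≤ s.length →
      PySem.Chars.join [','] (seperator_altLoop s i []).reverse
        = (grp ((s.take i).reverse)).reverse := by
  intro i
  induction i using Nat.strong_induction_on with
  | _ i ih =>
    intro hi
    by_cases h0 : i = 0
    · subst h0
      rw [seperator_altLoop]
      simp [PySem.Chars.join_nil, grp]
    · by_cases h3 : i ≤ 3
      · -- a single chunk: the loop runs once and the group is number[0:i]
        conv_lhs => rw [seperator_altLoop]
        simp only [if_pos (show i > 0 by omega)]
        have hi3 : i - 3 = 0 := by omega
        rw [hi3, seperator_altLoop]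
        simp only [gt_iff_lt, Nat.lt_irrefl, if_false, List.nil_append]
        have hm : max 0 ((i : Int) - 3) = (0 : Int) := by omega
        rw [hm, PySem.List.slice_zero_start, PySem.List.slice_to_natCast]
        rw [grp_short ((s.take i).reverse) (by simp; omega)]
        simp [PySem.Chars.join_singleton]
      · -- i ≥ 4: peel the rightmost 3-character group
        conv_lhs => rw [seperator_altLoop]
        simp only [if_pos (show i > 0 by omega)]
        rw [loop_acc, List.nil_append]
        have hm : max 0 ((i : Int) - 3) = (((i - 3 : Nat)) : Int) := by omega
        rw [hm, PySem.List.slice_natCast, (show i - (i - 3) = 3 by omega)]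
        have hne : seperator_altLoop s (i - 3) [] ≠ [] := by
          rw [seperator_altLoop]
          simp only [if_pos (show i - 3 > 0 by omega)]
          rw [loop_acc]
          simp
        rw [List.reverse_append, List.reverse_singleton,
          join_append_single _ _ _ (by simpa using hne),
          ih (i - 3) (by omega) (by omega)]
        have h4 : 4 ≤ ((s.take i).reverse).length := by simp; omega
        rw [grp_long _ h4]
        have eqA : ((s.take i).reverse).drop 3 = (s.take (i - 3)).reverse := by
          rw [List.reverse_take, List.drop_drop, List.reverse_take]
          congr 1
          omega
        have eqB : ((s.take i).reverse).take 3 = ((s.drop (i - 3)).take 3).reverse := by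
          have h1 : ((s.take i).drop (i - 3)).reverse
              = (s.take i).reverse.take ((s.take i).length - (i - 3)) := List.reverse_drop
          have h2 : (s.take i).length - (i - 3) = 3 := by simp; omega
          rw [h2] at h1
          rw [← h1, List.drop_take]
          congr 2
          omega
        rw [eqA]
        simp [List.reverse_append, eqB]

-- ===== VERDICT (by name: the statement is the Claim_ definition above) =====
theorem seperator_spec : Claim_equal_seperator := by
  intro number _
  unfold Spec_seperator
  simp only [seperator, seperator_alt]
  rw [foldA_eq_flatMap, List.nil_append]
  have hA := A_eq_grp (number.toList.reverse) 0 (by omega)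
  simp only [Nat.cast_zero, zero_add] at hA
  rw [hA]
  have hB := B_eq number.toList number.toList.length le_rfl
  simp only [List.take_length] at hB
  rw [hB]
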